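-- pv_equiv track=rewrite | github.com/carmoskus/aoc2024 | day21.py | trim_subpaths
-- ===== SOURCE A (Python) =====
-- def calc_prio(path):
--     num_reps = 0
--     for i in range(1, len(path)):
--         if path[i] == path[i-1]:
--             num_reps += 1
--     return num_reps
--
-- def trim_subpaths(foo):
--     res = []
--     for x in foo:
--         l = [len(y) for y in x]
--         min_l = min(l)
--         x = [a for a,b in zip(x, l) if b == min_l]
--         p = [calc_prio(y) for y in x]
--         max_p = max(p)
--         x = [a for a,b in zip(x, p) if b == max_p]
--         res.append(x)
--     return res
-- ===== SOURCE B (Python) =====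
-- def trim_subpaths(foo):
--     res = []
--     for x in foo:
--         min_l = min(len(y) for y in x)
--         best = -1
--         group = []
--         for y in x:
--             if len(y) != min_l:
--                 continue
--             p = sum(a == b for a, b in zip(y, y[1:]))
--             if p > best:
--                 best = p
--                 group = [y]
--             elif p == best:
--                 group.append(y)
--         res.append(group)
--     return res
-- ===== Notes on version B (the rewrite author's own statement) =====
-- stated objective: alternative
-- what changed: B fuses A's three intermediate lists per group (length list, prio list, two zip-filter passes) into one streaming argmax-with-ties pass that keeps only the running best priority and its tied elements, and counts adjacent repeats via zip(y, y[1:]) instead of index arithmetic.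
import Mathlib
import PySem

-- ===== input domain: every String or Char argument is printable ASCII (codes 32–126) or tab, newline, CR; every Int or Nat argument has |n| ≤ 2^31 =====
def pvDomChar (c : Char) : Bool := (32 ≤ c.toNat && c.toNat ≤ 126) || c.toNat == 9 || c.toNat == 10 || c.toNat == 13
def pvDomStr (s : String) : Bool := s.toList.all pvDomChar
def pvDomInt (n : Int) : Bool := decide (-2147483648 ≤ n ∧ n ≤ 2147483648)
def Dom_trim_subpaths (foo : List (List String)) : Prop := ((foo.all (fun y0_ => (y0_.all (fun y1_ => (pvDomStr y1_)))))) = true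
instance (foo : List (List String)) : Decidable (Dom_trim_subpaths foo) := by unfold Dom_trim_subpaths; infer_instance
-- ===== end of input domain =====

-- B replaces A's per-group chain of intermediate lists (lengths, zip-filter, prio list, zip-filter)
-- with a single streaming argmax-with-ties pass; alternative decomposition, same asymptotic cost.


-- ===== PORT A =====
def calc_prio (path : String) : Int :=
  (PySem.List.pyRange 1 (PySem.Str.len path) 1).foldl
    (fun num_reps i =>
      if PySem.Str.pyGet? path i == PySem.Str.pyGet? path (i - 1) then num_reps + 1 else num_reps) 0

def trim_subpaths (foo : List (List String)) : List (List String) :=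
  foo.foldl (fun res x =>
    let l := x.map (fun y => PySem.Str.len y)
    let min_l := (PySem.List.min? l (fun v => v)).getD 0   -- Pre_ excludes the ValueError (empty x)
    let x1 := ((x.zip l).filter (fun ab => ab.2 == min_l)).map (fun ab => ab.1)
    let p := x1.map calc_prio
    let max_p := (PySem.List.max? p (fun v => v)).getD 0
    let x2 := ((x1.zip p).filter (fun ab => ab.2 == max_p)).map (fun ab => ab.1)
    res ++ [x2]) []

-- ===== PORT B =====
def calc_prio_alt (y : String) : Int :=
  ((y.toList.zip (PySem.List.slice y.toList (some 1) none)).map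
    (fun ab => if ab.1 == ab.2 then (1 : Int) else 0)).sum

def trim_subpaths_alt (foo : List (List String)) : List (List String) :=
  foo.map (fun x =>
    let min_l := (PySem.List.min? (x.map (fun y => PySem.Str.len y)) (fun v => v)).getD 0  -- min over the generator; ValueError on empty x is outside Pre_
    (x.foldl (fun (s : Int × List String) y =>
      if PySem.Str.len y ≠ min_l then s
      else
        let p := calc_prio_alt y
        if s.1 < p then (p, [y])
        else if p = s.1 then (s.1, s.2 ++ [y])
        else s) (-1, [])).2)

-- ===== PRECONDITION & SPEC =====
-- Pre_ excludes exactly the inputs containing an empty sublist, on which both A and B raise ValueError (min of an empty sequence).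
def Pre_trim_subpaths (foo : List (List String)) : Prop := ∀ x ∈ foo, x ≠ []
instance (foo : List (List String)) : Decidable (Pre_trim_subpaths foo) := by unfold Pre_trim_subpaths; infer_instance
def pvWitness_trim_subpaths : List (List String) := [["aab", "ab", "ba", "bb"], ["x"]]

def Spec_trim_subpaths (foo : List (List String)) (out : List (List String)) : Prop := out = trim_subpaths_alt foo
instance (foo : List (List String)) (out : List (List String)) : Decidable (Spec_trim_subpaths foo out) := by unfold Spec_trim_subpaths; infer_instance

-- ===== CLAIM (what is proved, stated in full; the proofs are below) =====
def Claim_equal_trim_subpaths : Prop := ∀ (foo : List (List String)), Dom_trim_subpaths foo → Pre_trim_subpaths foo → Spec_trim_subpaths foo (trim_subpaths foo)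

-- ===== LEMMAS AND PROOFS =====

theorem zip_drop_eq (cs : List Char) :
    cs.zip (cs.drop 1) = (List.range (cs.length - 1)).map
      (fun k => (cs.getD k default, cs.getD (k+1) default)) := by
  apply List.ext_getElem
  · simp only [List.length_zip, List.length_map, List.length_range, List.length_drop]
    omega
  · intro i h1 h2
    simp only [List.length_zip, List.length_drop] at h1
    have hi : i < cs.length - 1 := by omega
    simp [List.getElem_zip, List.getElem_map, List.getElem_range,
      List.getD_eq_getElem?_getD, List.getElem?_eq_getElem (by omega : i < cs.length),
      List.getElem?_eq_getElem (by omega : i + 1 < cs.length)]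

theorem cp_eq' (s : String) :
    (PySem.List.pyRange 1 (PySem.Str.len s) 1).foldl
      (fun num_reps i =>
        if PySem.Str.pyGet? s i == PySem.Str.pyGet? s (i - 1) then num_reps + 1 else num_reps) 0
    = ((s.toList.zip (PySem.List.slice s.toList (some 1) none)).map
        (fun ab => if ab.1 == ab.2 then (1 : Int) else 0)).sum := by
  rw [PySem.List.foldl_count_if, PySem.List.sum_map_ite_one_zero,
    PySem.List.slice_from s.toList (by omega : (0:Int) ≤ 1)]
  set cs := s.toList with hcs
  simp only [Int.toNat_one]
  rw [zip_drop_eq, PySem.List.pyRange_one, List.countP_map, List.countP_map]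
  simp only [Int.zero_add, Nat.cast_inj]
  have hr : (PySem.Str.len s - 1).toNat = cs.length - 1 := by
    simp only [PySem.Str.len_eq, hcs]; omega
  rw [hr]
  apply List.countP_congr
  intro k hk
  simp only [List.mem_range] at hk
  have hk' : k < cs.length - 1 := hk
  simp only [Function.comp]
  have e1 : (1 : Int) + (k : Int) = ((k+1 : Nat) : Int) := by omega
  have e2 : (1 : Int) + (k : Int) - 1 = ((k : Nat) : Int) := by omega
  have hb : ∀ (n : Nat) (hn : n < cs.length), PySem.Str.pyGet? s (n : Int) = some cs[n] := by
    intro n hn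
    have : PySem.Str.pyGet? s (n : Int) = PySem.List.pyGet? cs (n : Int) := by simp [hcs]
    rw [this, PySem.List.pyGet?_natCast, List.getElem?_eq_getElem hn]
  have g1 : PySem.Str.pyGet? s ((1:Int) + k) = some cs[k+1] := by
    rw [e1]; exact hb (k+1) (by omega)
  have g2 : PySem.Str.pyGet? s ((1:Int) + k - 1) = some cs[k] := by
    rw [e2]; exact hb k (by omega)
  rw [g1, g2]
  simp [List.getD_eq_getElem?_getD,
    List.getElem?_eq_getElem (by omega : k < cs.length),
    List.getElem?_eq_getElem (by omega : k + 1 < cs.length)]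
  exact ⟨fun h => h.symm, fun h => h.symm⟩

theorem cp_eq (s : String) : calc_prio s = calc_prio_alt s := cp_eq' s

theorem cp_alt_nonneg (y : String) : 0 ≤ calc_prio_alt y := by
  unfold calc_prio_alt
  rw [PySem.List.sum_map_ite_one_zero]
  exact Int.natCast_nonneg _

theorem zip_filter_map (x : List String) (f : String → Int) (m : Int) :
    ((x.zip (x.map f)).filter (fun ab => ab.2 == m)).map (fun ab => ab.1)
      = x.filter (fun y => f y == m) := by
  induction x with
  | nil => rfl
  | cons a t ih =>
    simp only [List.map_cons, List.zip_cons_cons, List.filter_cons]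
    by_cases h : f a == m <;> simp [h, ih]

theorem foldl_skip (min_l : Int) (g : Int × List String → String → Int × List String)
    (x : List String) : ∀ (s0 : Int × List String),
    x.foldl (fun s y => if PySem.Str.len y ≠ min_l then s else g s y) s0
      = (x.filter (fun y => PySem.Str.len y == min_l)).foldl g s0 := by
  induction x with
  | nil => intro _; rfl
  | cons a t ih =>
    intro s0
    simp only [List.foldl_cons, List.filter_cons]
    by_cases h : PySem.Str.len a = min_l
    · rw [if_neg (not_not_intro h), if_pos (by simp only [beq_iff_eq]; exact h), List.foldl_cons, ih]
    · rw [if_pos h, if_neg (by simp only [beq_iff_eq]; exact h), ih]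

theorem stream_inv (p : String → Int) (hp : ∀ y, 0 ≤ p y) (q : List String) :
    let s := q.foldl (fun (s : Int × List String) y =>
      if s.1 < p y then (p y, [y])
      else if p y = s.1 then (s.1, s.2 ++ [y])
      else s) (-1, [])
    (∀ y ∈ q, p y ≤ s.1) ∧ s.2 = q.filter (fun y => p y == s.1) ∧
      (q ≠ [] → ∃ y ∈ q, p y = s.1) := by
  intro s
  induction q using List.reverseRecOn with
  | nil => simp [s]
  | append_singleton q y ih =>
    obtain ⟨hmax, hfil, hatt⟩ := ih
    simp only [s, List.foldl_append, List.foldl_cons, List.foldl_nil] at *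
    set t := q.foldl (fun (s : Int × List String) y =>
      if s.1 < p y then (p y, [y])
      else if p y = s.1 then (s.1, s.2 ++ [y])
      else s) (-1, []) with ht
    by_cases h1 : t.1 < p y
    · simp only [if_pos h1]
      refine ⟨?_, ?_, ?_⟩
      · intro z hz
        rcases List.mem_append.1 hz with hz | hz
        · exact le_of_lt (lt_of_le_of_lt (hmax z hz) h1)
        · simp at hz; simp [hz]
      · rw [List.filter_append]
        have : q.filter (fun z => p z == p y) = [] := by
          apply List.filter_eq_nil_iff.2
          intro z hz
          simp only [beq_iff_eq]
          exact ne_of_lt (lt_of_le_of_lt (hmax z hz) h1)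
        simp [this]
      · intro _; exact ⟨y, by simp⟩
    · simp only [if_neg h1]
      by_cases h2 : p y = t.1
      · simp only [if_pos h2]
        refine ⟨?_, ?_, ?_⟩
        · intro z hz
          rcases List.mem_append.1 hz with hz | hz
          · exact hmax z hz
          · simp at hz; simp [hz, h2]
        · rw [List.filter_append, hfil]; simp [h2]
        · intro _; exact ⟨y, by simp, h2⟩
      · simp only [if_neg h2]
        have hq : q ≠ [] := by
          rintro rfl
          simp only [List.foldl_nil] at ht
          have h3 : t.1 = -1 := by rw [ht]
          have := hp y
          omega
        refine ⟨?_, ?_, ?_⟩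
        · intro z hz
          rcases List.mem_append.1 hz with hz | hz
          · exact hmax z hz
          · simp at hz; subst hz; omega
        · rw [List.filter_append, hfil]; simp [h2]
        · intro _
          obtain ⟨z, hz, hzv⟩ := hatt hq
          exact ⟨z, List.mem_append_left _ hz, hzv⟩

theorem per_group (x : List String) (hx : x ≠ []) :
    (let l := x.map (fun y => PySem.Str.len y)
     let min_l := (PySem.List.min? l (fun v => v)).getD 0
     let x1 := ((x.zip l).filter (fun ab => ab.2 == min_l)).map (fun ab => ab.1)
     let p := x1.map calc_prio
     let max_p := (PySem.List.max? p (fun v => v)).getD 0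
     ((x1.zip p).filter (fun ab => ab.2 == max_p)).map (fun ab => ab.1))
    = (let min_l := (PySem.List.min? (x.map (fun y => PySem.Str.len y)) (fun v => v)).getD 0
       (x.foldl (fun (s : Int × List String) y =>
         if PySem.Str.len y ≠ min_l then s
         else
           let p := calc_prio_alt y
           if s.1 < p then (p, [y])
           else if p = s.1 then (s.1, s.2 ++ [y])
           else s) (-1, [])).2) := by
  simp only []
  -- the shared minimum exists (x is nonempty)
  obtain ⟨ml, hml⟩ : ∃ m, PySem.List.min? (x.map (fun y => PySem.Str.len y)) (fun v => v) = some m := by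
    rcases h : PySem.List.min? (x.map (fun y => PySem.Str.len y)) (fun v => v) with _ | m
    · exact absurd (by simpa [List.map_eq_nil_iff] using (PySem.List.min?_eq_none_iff _ _).1 h) hx
    · exact ⟨m, rfl⟩
  set ML := (PySem.List.min? (x.map (fun y => PySem.Str.len y)) (fun v => v)).getD 0 with hML
  have hMLeq : ML = ml := by rw [hML, hml]; rfl
  rw [zip_filter_map x (fun y => PySem.Str.len y) ML]
  set q := x.filter (fun y => PySem.Str.len y == ML) with hq
  -- q is nonempty: the minimum is attained
  have hqne : q ≠ [] := by
    have hmem := PySem.List.min?_mem hml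
    rcases List.mem_map.1 hmem with ⟨y, hy, hyl⟩
    intro hnil
    have : y ∈ q := List.mem_filter.2 ⟨hy, by simp only [beq_iff_eq]; rw [hyl, hMLeq]⟩
    simp [hnil] at this
  -- B's fold: skip the length test, then the streaming invariant
  have hsk := foldl_skip ML (fun (s : Int × List String) y =>
        if s.1 < calc_prio_alt y then (calc_prio_alt y, [y])
        else if calc_prio_alt y = s.1 then (s.1, s.2 ++ [y])
        else s) x ((-1 : Int), ([] : List String))
  rw [hsk, ← hq]
  have hinv := stream_inv calc_prio_alt cp_alt_nonneg q
  simp only [] at hinv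
  obtain ⟨hmaxI, hfil, hatt⟩ := hinv
  set st := q.foldl (fun (s : Int × List String) y =>
      if s.1 < calc_prio_alt y then (calc_prio_alt y, [y])
      else if calc_prio_alt y = s.1 then (s.1, s.2 ++ [y])
      else s) (-1, []) with hst
  -- A's max over the prio list
  have hqcp : q.map calc_prio = q.map calc_prio_alt := List.map_congr_left (fun y _ => cp_eq y)
  obtain ⟨M, hM⟩ : ∃ m, PySem.List.max? (q.map calc_prio) (fun v => v) = some m := by
    rcases h : PySem.List.max? (q.map calc_prio) (fun v => v) with _ | m
    · exact absurd (by simpa [List.map_eq_nil_iff] using (PySem.List.max?_eq_none_iff _ _).1 h) hqne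
    · exact ⟨m, rfl⟩
  rw [hM]
  simp only [Option.getD_some]
  rw [zip_filter_map q calc_prio M]
  -- M equals the streaming best
  have hMs : M = st.1 := by
    have hmem := PySem.List.max?_mem hM
    rw [hqcp] at hmem
    rcases List.mem_map.1 hmem with ⟨y2, hy2, hy2v⟩
    have h1 : M ≤ st.1 := hy2v ▸ hmaxI y2 hy2
    obtain ⟨y1, hy1, hy1v⟩ := hatt hqne
    have h2 : st.1 ≤ M := by
      have := PySem.List.max?_isMax hM (calc_prio y1) (by exact List.mem_map.2 ⟨y1, hy1, rfl⟩)
      rw [cp_eq y1, hy1v] at this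
      exact this
    omega
  rw [hfil]
  apply List.filter_congr
  intro y _
  simp [cp_eq y, hMs]

-- ===== VERDICT (by name: the statement is the Claim_ definition above) =====
theorem trim_subpaths_spec : Claim_equal_trim_subpaths := by
  intro foo _ hpre
  unfold Spec_trim_subpaths trim_subpaths trim_subpaths_alt
  rw [PySem.List.foldl_append_singleton_eq_map]
  simp only [List.nil_append]
  exact List.map_congr_left (fun x hx => per_group x (hpre x hx))
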